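-- pv_equiv track=rewrite | github.com/DanceMore/fieldstation-remote | flipper_ir_remote.py | map_ir_signal
-- ===== SOURCE A (Python) =====
-- REMOTE_CONFIGS = {
--     "nec_0x32": {
--         "protocol": "NEC",
--         "address": "0x32",
--         "mappings": {
--             # Channel controls
--             "0x11": "CHANNEL_UP",
--             "0x14": "CHANNEL_DOWN",
--
--             # Effects
--             "0x10": "EFFECT_PREV",
--             "0x12": "EFFECT_NEXT",
--
--             # Digits
--             "0x00": "DIGIT_0",
--             "0x01": "DIGIT_1",
--             "0x02": "DIGIT_2",
--             "0x03": "DIGIT_3",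
--             "0x04": "DIGIT_4",
--             "0x05": "DIGIT_5",
--             "0x06": "DIGIT_6",
--             "0x07": "DIGIT_7",
--             "0x08": "DIGIT_8",
--             "0x09": "DIGIT_9",
--         }
--     },
--     "samsung_tv": {
--         "protocol": "Samsung32",
--         "address": "0x07",
--         "mappings": {
--             "0x12": "CHANNEL_UP",
--             "0x10": "CHANNEL_DOWN",
--
--             # Samsung digit mappings
--             "0x04": "DIGIT_1",
--             "0x05": "DIGIT_2",
--             "0x06": "DIGIT_3",
--             "0x08": "DIGIT_4",
--             "0x09": "DIGIT_5",
--             "0x0A": "DIGIT_6",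
--             "0x0C": "DIGIT_7",
--             "0x0D": "DIGIT_8",
--             "0x0E": "DIGIT_9",
--             "0x11": "DIGIT_0",
--         }
--     },
--     "sony": {
--         "protocol": "SIRC",
--         "address": "0x01",
--         "mappings": {
--             "0x10": "CHANNEL_UP",
--             "0x11": "CHANNEL_DOWN",
--             "0x33": "EFFECT_NEXT",
--             "0x34": "EFFECT_PREV",
--
--             # Sony digit mappings
--             "0x00": "DIGIT_1",
--             "0x01": "DIGIT_2",
--             "0x02": "DIGIT_3",
--             "0x03": "DIGIT_4",
--             "0x04": "DIGIT_5",
--             "0x05": "DIGIT_6",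
--             "0x06": "DIGIT_7",
--             "0x07": "DIGIT_8",
--             "0x08": "DIGIT_9",
--             "0x09": "DIGIT_0",
--         }
--     },
--     "sony_0x77": {
--         "protocol": "SIRC",
--         "address": "0x77",
--         "mappings": {
--             "0x0D": "DIGITAL_ANALOG",
--         }
--     },
-- }
--
-- def map_ir_signal(protocol, address, command):
--     """Map IR signal to event name"""
--     for remote_name, config in REMOTE_CONFIGS.items():
--         if config["protocol"] == protocol and config["address"] == address:
--             if command in config["mappings"]:
--                 return config["mappings"][command], protocol, address, command
--             else:
--                 return f"UNMAPPED_{remote_name}_{command}", protocol, address, command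
--     return f"UNKNOWN_{protocol}_{address}_{command}", protocol, address, command
-- ===== SOURCE B (Python) =====
-- # Flat lookup tables written out once at module level: a single dict keyed by the
-- # full (protocol, address, command) triple resolves mapped events in one lookup,
-- # and a small (protocol, address) -> remote_name dict distinguishes UNMAPPED from UNKNOWN.
--
-- _EVENTS = {
--     ('NEC', '0x32', '0x11'): 'CHANNEL_UP',
--     ('NEC', '0x32', '0x14'): 'CHANNEL_DOWN',
--     ('NEC', '0x32', '0x10'): 'EFFECT_PREV',
--     ('NEC', '0x32', '0x12'): 'EFFECT_NEXT',
--     ('NEC', '0x32', '0x00'): 'DIGIT_0',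
--     ('NEC', '0x32', '0x01'): 'DIGIT_1',
--     ('NEC', '0x32', '0x02'): 'DIGIT_2',
--     ('NEC', '0x32', '0x03'): 'DIGIT_3',
--     ('NEC', '0x32', '0x04'): 'DIGIT_4',
--     ('NEC', '0x32', '0x05'): 'DIGIT_5',
--     ('NEC', '0x32', '0x06'): 'DIGIT_6',
--     ('NEC', '0x32', '0x07'): 'DIGIT_7',
--     ('NEC', '0x32', '0x08'): 'DIGIT_8',
--     ('NEC', '0x32', '0x09'): 'DIGIT_9',
--     ('Samsung32', '0x07', '0x12'): 'CHANNEL_UP',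
--     ('Samsung32', '0x07', '0x10'): 'CHANNEL_DOWN',
--     ('Samsung32', '0x07', '0x04'): 'DIGIT_1',
--     ('Samsung32', '0x07', '0x05'): 'DIGIT_2',
--     ('Samsung32', '0x07', '0x06'): 'DIGIT_3',
--     ('Samsung32', '0x07', '0x08'): 'DIGIT_4',
--     ('Samsung32', '0x07', '0x09'): 'DIGIT_5',
--     ('Samsung32', '0x07', '0x0A'): 'DIGIT_6',
--     ('Samsung32', '0x07', '0x0C'): 'DIGIT_7',
--     ('Samsung32', '0x07', '0x0D'): 'DIGIT_8',
--     ('Samsung32', '0x07', '0x0E'): 'DIGIT_9',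
--     ('Samsung32', '0x07', '0x11'): 'DIGIT_0',
--     ('SIRC', '0x01', '0x10'): 'CHANNEL_UP',
--     ('SIRC', '0x01', '0x11'): 'CHANNEL_DOWN',
--     ('SIRC', '0x01', '0x33'): 'EFFECT_NEXT',
--     ('SIRC', '0x01', '0x34'): 'EFFECT_PREV',
--     ('SIRC', '0x01', '0x00'): 'DIGIT_1',
--     ('SIRC', '0x01', '0x01'): 'DIGIT_2',
--     ('SIRC', '0x01', '0x02'): 'DIGIT_3',
--     ('SIRC', '0x01', '0x03'): 'DIGIT_4',
--     ('SIRC', '0x01', '0x04'): 'DIGIT_5',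
--     ('SIRC', '0x01', '0x05'): 'DIGIT_6',
--     ('SIRC', '0x01', '0x06'): 'DIGIT_7',
--     ('SIRC', '0x01', '0x07'): 'DIGIT_8',
--     ('SIRC', '0x01', '0x08'): 'DIGIT_9',
--     ('SIRC', '0x01', '0x09'): 'DIGIT_0',
--     ('SIRC', '0x77', '0x0D'): 'DIGITAL_ANALOG',
-- }
--
-- _REMOTES = {
--     ('NEC', '0x32'): 'nec_0x32',
--     ('Samsung32', '0x07'): 'samsung_tv',
--     ('SIRC', '0x01'): 'sony',
--     ('SIRC', '0x77'): 'sony_0x77',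
-- }
--
--
-- def map_ir_signal(protocol, address, command):
--     """Map IR signal to event name"""
--     try:
--         return _EVENTS[(protocol, address, command)], protocol, address, command
--     except KeyError:
--         pass
--     try:
--         name = _REMOTES[(protocol, address)]
--     except KeyError:
--         return f"UNKNOWN_{protocol}_{address}_{command}", protocol, address, command
--     return f"UNMAPPED_{name}_{command}", protocol, address, command
-- ===== Notes on version B (the rewrite author's own statement) =====
-- stated objective: alternative
-- what changed: Replaces A's per-call linear scan over nested remote configs with two flat module-level tables: a dict keyed by the full (protocol, address, command) triple giving the event in one lookup, and a (protocol, address) -> remote_name dict that distinguishes UNMAPPED from UNKNOWN.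
import Mathlib
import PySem

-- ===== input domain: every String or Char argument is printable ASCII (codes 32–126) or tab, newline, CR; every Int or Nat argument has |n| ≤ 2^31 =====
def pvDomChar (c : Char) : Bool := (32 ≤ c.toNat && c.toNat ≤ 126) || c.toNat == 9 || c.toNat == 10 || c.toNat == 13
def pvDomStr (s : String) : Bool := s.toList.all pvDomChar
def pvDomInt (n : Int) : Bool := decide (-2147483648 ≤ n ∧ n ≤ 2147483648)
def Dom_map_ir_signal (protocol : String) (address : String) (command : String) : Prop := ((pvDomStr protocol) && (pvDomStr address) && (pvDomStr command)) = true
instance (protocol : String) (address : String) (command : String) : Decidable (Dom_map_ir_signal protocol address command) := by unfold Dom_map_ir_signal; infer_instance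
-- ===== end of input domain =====

-- B replaces A's per-call scan over nested remote configs with two flat module-level
-- tables: (protocol, address, command) -> event and (protocol, address) -> remote_name
-- (objective: alternative — one keyed lookup instead of a scan with a nested dict).

-- ===== PORT A =====
-- A's module data REMOTE_CONFIGS: the four "mappings" dicts …
def pvMapNec : PySem.Dict String String := PySem.Dict.mk
  [("0x11","CHANNEL_UP"),("0x14","CHANNEL_DOWN"),("0x10","EFFECT_PREV"),("0x12","EFFECT_NEXT"),
   ("0x00","DIGIT_0"),("0x01","DIGIT_1"),("0x02","DIGIT_2"),("0x03","DIGIT_3"),("0x04","DIGIT_4"),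
   ("0x05","DIGIT_5"),("0x06","DIGIT_6"),("0x07","DIGIT_7"),("0x08","DIGIT_8"),("0x09","DIGIT_9")]
def pvMapSamsung : PySem.Dict String String := PySem.Dict.mk
  [("0x12","CHANNEL_UP"),("0x10","CHANNEL_DOWN"),
   ("0x04","DIGIT_1"),("0x05","DIGIT_2"),("0x06","DIGIT_3"),("0x08","DIGIT_4"),("0x09","DIGIT_5"),
   ("0x0A","DIGIT_6"),("0x0C","DIGIT_7"),("0x0D","DIGIT_8"),("0x0E","DIGIT_9"),("0x11","DIGIT_0")]
def pvMapSony : PySem.Dict String String := PySem.Dict.mk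
  [("0x10","CHANNEL_UP"),("0x11","CHANNEL_DOWN"),("0x33","EFFECT_NEXT"),("0x34","EFFECT_PREV"),
   ("0x00","DIGIT_1"),("0x01","DIGIT_2"),("0x02","DIGIT_3"),("0x03","DIGIT_4"),("0x04","DIGIT_5"),
   ("0x05","DIGIT_6"),("0x06","DIGIT_7"),("0x07","DIGIT_8"),("0x08","DIGIT_9"),("0x09","DIGIT_0")]
def pvMapSony77 : PySem.Dict String String := PySem.Dict.mk [("0x0D","DIGITAL_ANALOG")]

-- … and the configs as (remote_name, protocol, address, mappings), in the dict's insertion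
-- order; A's `for remote_name, config in REMOTE_CONFIGS.items()` walks it in this order.
def pvConfigs : List (String × String × String × PySem.Dict String String) :=
  [ ("nec_0x32",  "NEC",       "0x32", pvMapNec),
    ("samsung_tv","Samsung32", "0x07", pvMapSamsung),
    ("sony",      "SIRC",      "0x01", pvMapSony),
    ("sony_0x77", "SIRC",      "0x77", pvMapSony77) ]

-- A's for-loop over REMOTE_CONFIGS.items(): first matching (protocol, address) wins, with
-- A's early returns; falling off the loop gives the UNKNOWN tuple.
def pvLoopA (protocol address command : String) :
    List (String × String × String × PySem.Dict String String) → String × String × String × String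
  | [] => ("UNKNOWN_" ++ protocol ++ "_" ++ address ++ "_" ++ command, protocol, address, command)
  | (remote_name, prot, addr, mappings) :: rest =>
    if prot == protocol && addr == address then
      if mappings.contains command then
        (mappings.getD command "", protocol, address, command)
      else
        ("UNMAPPED_" ++ remote_name ++ "_" ++ command, protocol, address, command)
    else pvLoopA protocol address command rest

def map_ir_signal (protocol : String) (address : String) (command : String) : String × String × String × String :=
  pvLoopA protocol address command pvConfigs

-- ===== PORT B =====
-- B's module data: the flat literal table _EVENTS keyed by the full signal triple …
def pvEvents : PySem.Dict (String × String × String) String := PySem.Dict.mk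
  [(("NEC", "0x32", "0x11"), "CHANNEL_UP"),
   (("NEC", "0x32", "0x14"), "CHANNEL_DOWN"),
   (("NEC", "0x32", "0x10"), "EFFECT_PREV"),
   (("NEC", "0x32", "0x12"), "EFFECT_NEXT"),
   (("NEC", "0x32", "0x00"), "DIGIT_0"),
   (("NEC", "0x32", "0x01"), "DIGIT_1"),
   (("NEC", "0x32", "0x02"), "DIGIT_2"),
   (("NEC", "0x32", "0x03"), "DIGIT_3"),
   (("NEC", "0x32", "0x04"), "DIGIT_4"),
   (("NEC", "0x32", "0x05"), "DIGIT_5"),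
   (("NEC", "0x32", "0x06"), "DIGIT_6"),
   (("NEC", "0x32", "0x07"), "DIGIT_7"),
   (("NEC", "0x32", "0x08"), "DIGIT_8"),
   (("NEC", "0x32", "0x09"), "DIGIT_9"),
   (("Samsung32", "0x07", "0x12"), "CHANNEL_UP"),
   (("Samsung32", "0x07", "0x10"), "CHANNEL_DOWN"),
   (("Samsung32", "0x07", "0x04"), "DIGIT_1"),
   (("Samsung32", "0x07", "0x05"), "DIGIT_2"),
   (("Samsung32", "0x07", "0x06"), "DIGIT_3"),
   (("Samsung32", "0x07", "0x08"), "DIGIT_4"),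
   (("Samsung32", "0x07", "0x09"), "DIGIT_5"),
   (("Samsung32", "0x07", "0x0A"), "DIGIT_6"),
   (("Samsung32", "0x07", "0x0C"), "DIGIT_7"),
   (("Samsung32", "0x07", "0x0D"), "DIGIT_8"),
   (("Samsung32", "0x07", "0x0E"), "DIGIT_9"),
   (("Samsung32", "0x07", "0x11"), "DIGIT_0"),
   (("SIRC", "0x01", "0x10"), "CHANNEL_UP"),
   (("SIRC", "0x01", "0x11"), "CHANNEL_DOWN"),
   (("SIRC", "0x01", "0x33"), "EFFECT_NEXT"),
   (("SIRC", "0x01", "0x34"), "EFFECT_PREV"),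
   (("SIRC", "0x01", "0x00"), "DIGIT_1"),
   (("SIRC", "0x01", "0x01"), "DIGIT_2"),
   (("SIRC", "0x01", "0x02"), "DIGIT_3"),
   (("SIRC", "0x01", "0x03"), "DIGIT_4"),
   (("SIRC", "0x01", "0x04"), "DIGIT_5"),
   (("SIRC", "0x01", "0x05"), "DIGIT_6"),
   (("SIRC", "0x01", "0x06"), "DIGIT_7"),
   (("SIRC", "0x01", "0x07"), "DIGIT_8"),
   (("SIRC", "0x01", "0x08"), "DIGIT_9"),
   (("SIRC", "0x01", "0x09"), "DIGIT_0"),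
   (("SIRC", "0x77", "0x0D"), "DIGITAL_ANALOG")]

-- … and _REMOTES, keyed by (protocol, address).
def pvRemotes : PySem.Dict (String × String) String := PySem.Dict.mk
  [(("NEC", "0x32"), "nec_0x32"),
   (("Samsung32", "0x07"), "samsung_tv"),
   (("SIRC", "0x01"), "sony"),
   (("SIRC", "0x77"), "sony_0x77")]

-- try: return _EVENTS[...] / except KeyError → match on get?; same for _REMOTES.
def map_ir_signal_alt (protocol : String) (address : String) (command : String) : String × String × String × String :=
  match pvEvents.get? (protocol, address, command) with
  | some event => (event, protocol, address, command)
  | none =>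
    match pvRemotes.get? (protocol, address) with
    | none => ("UNKNOWN_" ++ protocol ++ "_" ++ address ++ "_" ++ command, protocol, address, command)
    | some name => ("UNMAPPED_" ++ name ++ "_" ++ command, protocol, address, command)

-- ===== PRECONDITION & SPEC =====
def Spec_map_ir_signal (protocol : String) (address : String) (command : String) (out : String × String × String × String) : Prop := out = map_ir_signal_alt protocol address command
instance (protocol : String) (address : String) (command : String) (out : String × String × String × String) : Decidable (Spec_map_ir_signal protocol address command out) := by unfold Spec_map_ir_signal; infer_instance

-- ===== CLAIM =====
def Claim_equal_map_ir_signal : Prop := ∀ (protocol : String) (address : String) (command : String), Dom_map_ir_signal protocol address command → Spec_map_ir_signal protocol address command (map_ir_signal protocol address command)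

-- ===== LEMMAS AND PROOFS =====
-- lookup in an empty literal dict
theorem pv_get?_nil {K V : Type} [BEq K] (k : K) : (PySem.Dict.mk ([] : List (K × V))).get? k = none := rfl

-- Restricting B's triple-keyed table to one concrete (protocol, address) is that remote's mapping dict.
theorem pv_ev_nec (c : String) : pvEvents.get? ("NEC", "0x32", c) = pvMapNec.get? c := by
  simp [pvEvents, pvMapNec, PySem.Dict.get?_mk_cons, pv_get?_nil]

theorem pv_ev_samsung (c : String) : pvEvents.get? ("Samsung32", "0x07", c) = pvMapSamsung.get? c := by
  simp [pvEvents, pvMapSamsung, PySem.Dict.get?_mk_cons, pv_get?_nil]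

theorem pv_ev_sony (c : String) : pvEvents.get? ("SIRC", "0x01", c) = pvMapSony.get? c := by
  simp [pvEvents, pvMapSony, PySem.Dict.get?_mk_cons, pv_get?_nil]

theorem pv_ev_sony77 (c : String) : pvEvents.get? ("SIRC", "0x77", c) = pvMapSony77.get? c := by
  simp [pvEvents, pvMapSony77, PySem.Dict.get?_mk_cons, pv_get?_nil]

-- A's "if command in mappings: return mappings[command] else UNMAPPED" as a match on get?.
theorem pv_branch_eq (remote_name : String) (m : PySem.Dict String String)
    (protocol address command : String) :
    (if m.contains command then (m.getD command "", protocol, address, command)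
     else ("UNMAPPED_" ++ remote_name ++ "_" ++ command, protocol, address, command))
      = (match m.get? command with
         | none => ("UNMAPPED_" ++ remote_name ++ "_" ++ command, protocol, address, command)
         | some event => (event, protocol, address, command)) := by
  rw [PySem.Dict.contains_eq_isSome_get?, PySem.Dict.getD_eq_get?_getD]
  cases m.get? command <;> simp

-- Case split on the four (protocol, address) pairs that occur in the tables.
theorem map_ir_equal (protocol address command : String) :
    map_ir_signal protocol address command = map_ir_signal_alt protocol address command := by
  rcases eq_or_ne protocol "NEC" with hp | hp
  · subst hp
    rcases eq_or_ne address "0x32" with ha | ha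
    · subst ha
      simp only [map_ir_signal, map_ir_signal_alt, pvConfigs, pvLoopA, pv_ev_nec, pv_branch_eq]
      norm_num [pvRemotes, PySem.Dict.get?_mk_cons]
      cases pvMapNec.get? command <;> rfl
    · simp [map_ir_signal, map_ir_signal_alt, pvConfigs, pvLoopA, pvEvents, pvRemotes,
        PySem.Dict.get?_mk_cons, pv_get?_nil, Ne.symm ha]
  · rcases eq_or_ne protocol "Samsung32" with hp2 | hp2
    · subst hp2
      rcases eq_or_ne address "0x07" with ha | ha
      · subst ha
        simp only [map_ir_signal, map_ir_signal_alt, pvConfigs, pvLoopA, pv_ev_samsung, pv_branch_eq]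
        norm_num [pvRemotes, PySem.Dict.get?_mk_cons]
        cases pvMapSamsung.get? command <;> rfl
      · simp [map_ir_signal, map_ir_signal_alt, pvConfigs, pvLoopA, pvEvents, pvRemotes,
          PySem.Dict.get?_mk_cons, pv_get?_nil, Ne.symm ha]
    · rcases eq_or_ne protocol "SIRC" with hp3 | hp3
      · subst hp3
        rcases eq_or_ne address "0x01" with ha | ha
        · subst ha
          simp only [map_ir_signal, map_ir_signal_alt, pvConfigs, pvLoopA, pv_ev_sony, pv_branch_eq]
          norm_num [pvRemotes, PySem.Dict.get?_mk_cons]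
          cases pvMapSony.get? command <;> rfl
        · rcases eq_or_ne address "0x77" with ha2 | ha2
          · subst ha2
            simp only [map_ir_signal, map_ir_signal_alt, pvConfigs, pvLoopA, pv_ev_sony77, pv_branch_eq]
            norm_num [pvRemotes, PySem.Dict.get?_mk_cons]
            cases pvMapSony77.get? command <;> rfl
          · simp [map_ir_signal, map_ir_signal_alt, pvConfigs, pvLoopA, pvEvents, pvRemotes,
              PySem.Dict.get?_mk_cons, pv_get?_nil, Ne.symm ha, Ne.symm ha2]
      · simp [map_ir_signal, map_ir_signal_alt, pvConfigs, pvLoopA, pvEvents, pvRemotes,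
          PySem.Dict.get?_mk_cons, pv_get?_nil, Ne.symm hp, Ne.symm hp2, Ne.symm hp3]

-- ===== VERDICT =====
theorem map_ir_signal_spec : Claim_equal_map_ir_signal := by
  intro p a c _
  exact map_ir_equal p a c
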